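-- pv_equiv track=rewrite | github.com/jotix16/tools | i6lib/paths.py | goodPathRepr
-- ===== SOURCE A (Python) =====
-- GoodPathLen = 5
--
-- def goodPathRepr(pathStr, goodPathLen=GoodPathLen):
-- 	if pathStr is None:
-- 		return "<None>"
-- 	if pathStr == "":
-- 		return "<Empty>"
-- 	assert pathStr
-- 	path = pathStr.split("/")
-- 	pathStr = path[-1]
-- 	path = path[:-1]
-- 	while len(path) > 0:
-- 		if len(pathStr) >= goodPathLen: break
-- 		newPathStr = path[-1] + "/" + pathStr
-- 		if len(newPathStr) > goodPathLen: break
-- 		pathStr = newPathStr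
-- 		path = path[:-1]
-- 	return pathStr
-- ===== SOURCE B (Python) =====
-- GoodPathLen = 5
--
-- def goodPathRepr(pathStr, goodPathLen=GoodPathLen):
--     if pathStr is None:
--         return "<None>"
--     if pathStr == "":
--         return "<Empty>"
--     comps = pathStr.split("/")
--     budget = goodPathLen - len(comps[-1])
--     k = 1
--     for c in reversed(comps[:-1]):
--         budget -= len(c) + 1
--         if budget < 0:
--             break
--         k += 1
--     return "/".join(comps[-k:])
-- ===== Notes on version B (the rewrite author's own statement) =====
-- stated objective: alternative
-- what changed: Instead of repeatedly building candidate strings (path[-1] + '/' + pathStr) and re-testing their lengths, B does pure integer arithmetic: it counts how many trailing components fit in the length budget (the redundant 'len >= goodPathLen' break is dropped, provably subsumed) and then materialises the answer with a single slice + '/'.join.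
import Mathlib
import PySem

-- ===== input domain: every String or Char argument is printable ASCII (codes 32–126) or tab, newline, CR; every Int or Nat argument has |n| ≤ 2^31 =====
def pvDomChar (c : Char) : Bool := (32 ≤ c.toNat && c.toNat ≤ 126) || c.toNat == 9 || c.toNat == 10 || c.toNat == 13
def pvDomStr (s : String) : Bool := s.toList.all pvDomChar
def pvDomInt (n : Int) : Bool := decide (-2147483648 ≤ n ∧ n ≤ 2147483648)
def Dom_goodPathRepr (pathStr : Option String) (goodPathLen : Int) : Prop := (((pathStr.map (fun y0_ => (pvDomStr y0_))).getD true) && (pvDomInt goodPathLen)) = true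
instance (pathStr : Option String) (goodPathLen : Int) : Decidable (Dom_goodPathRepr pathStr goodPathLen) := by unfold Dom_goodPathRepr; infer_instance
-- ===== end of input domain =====

-- B replaces A's repeated candidate-string building by integer budget arithmetic over the
-- trailing components plus one final slice + join (objective: alternative decomposition).

-- ===== PORT A =====
-- the while loop of A: state (path, pathStr), path shrinks by path[:-1] each iteration
def goodPathReprLoop (goodPathLen : Int) (path : List String) (pathStr : String) : String :=
  if 0 < path.length then
    if PySem.Str.len pathStr ≥ goodPathLen then pathStr
    else
      -- path[-1] is always present here (path nonempty), so getD is never taken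
      let newPathStr : String := ((PySem.List.pyGet? path (-1)).getD "") ++ "/" ++ pathStr
      if PySem.Str.len newPathStr > goodPathLen then pathStr
      else goodPathReprLoop goodPathLen (PySem.List.slice path none (some (-1))) newPathStr
  else pathStr
termination_by path.length
decreasing_by
  simp only [PySem.List.slice_to_neg_one, List.length_dropLast]
  omega

def goodPathRepr (pathStr : Option String) (goodPathLen : Int) : String :=
  match pathStr with
  | none => "<None>"
  | some s =>
    if s = "" then "<Empty>"
    else
      -- path = pathStr.split("/"): sep "/" is nonempty, so split? never fails (getD unreachable);
      -- pathStr = path[-1] (split output is never [], so getD unreachable); path = path[:-1]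
      goodPathReprLoop goodPathLen
        (PySem.List.slice ((PySem.Str.split? s "/").getD []) none (some (-1)))
        ((PySem.List.pyGet? ((PySem.Str.split? s "/").getD []) (-1)).getD "")

-- ===== PORT B =====
-- B's for loop over reversed(comps[:-1]): counts how many trailing components still fit
def goodPathReprAltLoop (budget : Int) (rcs : List String) (k : Int) : Int :=
  match rcs with
  | [] => k
  | c :: rest =>
    let budget' := budget - (PySem.Str.len c + 1)
    if budget' < 0 then k
    else goodPathReprAltLoop budget' rest (k + 1)

def goodPathRepr_alt (pathStr : Option String) (goodPathLen : Int) : String :=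
  match pathStr with
  | none => "<None>"
  | some s =>
    if s = "" then "<Empty>"
    else
      -- comps = pathStr.split("/"); budget = goodPathLen - len(comps[-1]);
      -- k = loop over reversed(comps[:-1]); return "/".join(comps[-k:])
      PySem.Str.join "/"
        (PySem.List.slice ((PySem.Str.split? s "/").getD [])
          (some (-(goodPathReprAltLoop
            (goodPathLen - PySem.Str.len ((PySem.List.pyGet? ((PySem.Str.split? s "/").getD []) (-1)).getD ""))
            (PySem.List.slice ((PySem.Str.split? s "/").getD []) none (some (-1))).reverse 1))) none)

-- ===== PRECONDITION & SPEC =====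
def Spec_goodPathRepr (pathStr : Option String) (goodPathLen : Int) (out : String) : Prop := out = goodPathRepr_alt pathStr goodPathLen
instance (pathStr : Option String) (goodPathLen : Int) (out : String) : Decidable (Spec_goodPathRepr pathStr goodPathLen out) := by unfold Spec_goodPathRepr; infer_instance

-- ===== CLAIM (what is proved, stated in full; the proofs are below) =====
def Claim_equal_goodPathRepr : Prop := ∀ (pathStr : Option String) (goodPathLen : Int), Dom_goodPathRepr pathStr goodPathLen → Spec_goodPathRepr pathStr goodPathLen (goodPathRepr pathStr goodPathLen)

-- ===== LEMMAS AND PROOFS =====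

-- proof-level count: how many components B's loop accepts
def cntB (b : Int) : List String → Nat
  | [] => 0
  | c :: rest =>
    if b - (PySem.Str.len c + 1) < 0 then 0
    else cntB (b - (PySem.Str.len c + 1)) rest + 1

theorem altLoop_eq (rs : List String) : ∀ (b k : Int),
    goodPathReprAltLoop b rs k = k + (cntB b rs : Int) := by
  induction rs with
  | nil => intro b k; simp [goodPathReprAltLoop, cntB]
  | cons c rest ih =>
    intro b k
    simp only [goodPathReprAltLoop, cntB]
    split_ifs with h
    · simp
    · rw [ih]; push_cast; ring

theorem cntB_le (rs : List String) : ∀ (b : Int), cntB b rs ≤ rs.length := by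
  induction rs with
  | nil => intro b; simp [cntB]
  | cons c rest ih =>
    intro b
    simp only [cntB, List.length_cons]
    split_ifs with h
    · omega
    · have := ih (b - (PySem.Str.len c + 1)); omega

theorem pyGet?_concat_neg_one {α : Type} (ys : List α) (c : α) :
    PySem.List.pyGet? (ys ++ [c]) (-1) = some c := by
  simp only [PySem.List.pyGet?, PySem.List.pyIdx?]
  have h1 : ¬ ((0:Int) ≤ -1) := by omega
  have h2 : -((ys ++ [c]).length : Int) ≤ -1 := by
    simp only [List.length_append, List.length_cons, List.length_nil]
    omega
  simp only [h1, if_false, h2, if_pos]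
  have h3 : (ys ++ [c]).length - ((-(-1:Int)).toNat) = ys.length := by
    simp [List.length_append]
  rw [h3]
  change (ys ++ [c])[ys.length]? = some c
  rw [List.getElem?_append_right (le_refl _)]
  simp

theorem join_cons_of_ne_nil (sep x : List Char) (ys : List (List Char)) (h : ys ≠ []) :
    PySem.Chars.join sep (x :: ys) = x ++ sep ++ PySem.Chars.join sep ys := by
  cases ys with
  | nil => exact absurd rfl h
  | cons q rest => exact PySem.Chars.join_cons_cons sep x q rest

theorem join_concat_pair (sep : List Char) (xs : List (List Char)) (a b : List Char) :
    PySem.Chars.join sep (xs ++ [a ++ sep ++ b]) = PySem.Chars.join sep (xs ++ [a, b]) := by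
  induction xs with
  | nil =>
    simp only [List.nil_append]
    rw [PySem.Chars.join_singleton, PySem.Chars.join_cons_cons, PySem.Chars.join_singleton]
  | cons x xs ih =>
    rw [List.cons_append, List.cons_append,
      join_cons_of_ne_nil sep x (xs ++ [a ++ sep ++ b]) (by simp),
      join_cons_of_ne_nil sep x (xs ++ [a, b]) (by simp), ih]

theorem str_len_nonneg (s : String) : 0 ≤ PySem.Str.len s := by
  rw [PySem.Str.len_eq]; positivity

theorem len_glue (c cur : String) :
    PySem.Str.len (c ++ "/" ++ cur) = PySem.Str.len c + 1 + PySem.Str.len cur := by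
  simp only [PySem.Str.len_eq, String.toList_append]
  have h4 : ("/" : String).toList = ['/'] := by decide
  simp [h4]
  ring

-- main loop correspondence: A's loop, run on rs.reverse, yields the join of the
-- cntB-accepted prefix of rs (reversed back) followed by the current string
theorem loop_main (rs : List String) : ∀ (cur : String) (g : Int),
    (goodPathReprLoop g rs.reverse cur).toList
      = PySem.Chars.join ['/']
          (((rs.take (cntB (g - PySem.Str.len cur) rs)).reverse ++ [cur]).map String.toList) := by
  induction rs with
  | nil =>
    intro cur g
    rw [goodPathReprLoop]
    simp [cntB, PySem.Chars.join_singleton]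
  | cons c rest ih =>
    intro cur g
    have hne : (c :: rest).reverse = rest.reverse ++ [c] := by simp
    rw [goodPathReprLoop, hne]
    have hlen : 0 < (rest.reverse ++ [c]).length := by simp
    rw [if_pos hlen]
    have hget : PySem.List.pyGet? (rest.reverse ++ [c]) (-1) = some c :=
      pyGet?_concat_neg_one rest.reverse c
    have hcnonneg := str_len_nonneg c
    by_cases h1 : PySem.Str.len cur ≥ g
    · rw [if_pos h1]
      have : cntB (g - PySem.Str.len cur) (c :: rest) = 0 := by
        simp only [cntB]
        rw [if_pos (by omega)]
      rw [this]
      simp [PySem.Chars.join_singleton]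
    · rw [if_neg h1]
      simp only [hget, Option.getD_some]
      have hlg := len_glue c cur
      by_cases h2 : PySem.Str.len (c ++ "/" ++ cur) > g
      · rw [if_pos h2]
        have : cntB (g - PySem.Str.len cur) (c :: rest) = 0 := by
          simp only [cntB]
          rw [if_pos (by omega)]
        rw [this]
        simp [PySem.Chars.join_singleton]
      · rw [if_neg h2]
        rw [PySem.List.slice_to_neg_one, List.dropLast_concat]
        rw [ih (c ++ "/" ++ cur) g]
        have hb : g - PySem.Str.len (c ++ "/" ++ cur)
            = g - PySem.Str.len cur - (PySem.Str.len c + 1) := by omega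
        have hc : cntB (g - PySem.Str.len cur) (c :: rest)
            = cntB (g - PySem.Str.len (c ++ "/" ++ cur)) rest + 1 := by
          simp only [cntB]
          rw [if_neg (by omega), hb]
        rw [hc]
        set m := cntB (g - PySem.Str.len (c ++ "/" ++ cur)) rest with hm
        have htake : (c :: rest).take (m + 1) = c :: rest.take m := rfl
        rw [htake]
        simp only [List.reverse_cons, List.map_append, List.map_cons, List.map_nil]
        have hglue : (c ++ "/" ++ cur).toList = c.toList ++ ['/'] ++ cur.toList := by
          have h4 : ("/" : String).toList = ['/'] := by decide
          simp [String.toList_append, h4]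
        rw [hglue]
        rw [join_concat_pair ['/'] ((rest.take m).reverse.map String.toList) c.toList cur.toList]
        simp

theorem drop_reverse_take (l : List String) (n : Nat) :
    (l.reverse.take n).reverse = l.drop (l.length - n) := by
  rw [List.take_reverse, List.reverse_reverse]

-- ===== VERDICT (by name: the statement is the Claim_ definition above) =====
theorem goodPathRepr_spec : Claim_equal_goodPathRepr := by
  intro pathStr g _
  unfold Spec_goodPathRepr
  cases pathStr with
  | none => rfl
  | some s =>
    simp only [goodPathRepr, goodPathRepr_alt]
    by_cases hs : s = ""
    · rw [if_pos hs, if_pos hs]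
    · rw [if_neg hs, if_neg hs]
      set comps : List String := (PySem.Str.split? s "/").getD [] with hcomps
      rcases List.eq_nil_or_concat comps with hnil | ⟨init, last, hconcat⟩
      · -- comps = [] (never happens for real split output, but both sides agree anyway)
        rw [hnil]
        have h1 : PySem.List.pyGet? ([] : List String) (-1) = none := by decide
        have h2 : PySem.List.slice ([] : List String) none (some (-1)) = [] := by
          rw [PySem.List.slice_to_neg_one]; rfl
        rw [h1, h2]
        simp only [Option.getD_none, List.reverse_nil]
        rw [goodPathReprLoop]
        simp only [List.length_nil, lt_irrefl, if_false]
        have hk : goodPathReprAltLoop (g - PySem.Str.len "") [] 1 = 1 := rfl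
        rw [hk]
        have hsl : PySem.List.slice ([] : List String) (some (-1)) none = [] := by
          have : (-1 : Int) = -((1:Nat) : Int) := by norm_num
          rw [this, PySem.List.slice_from_neg_natCast _ 1 (by omega)]
          rfl
        rw [hsl]
        apply String.toList_inj.mp
        rw [PySem.Str.toList_join]
        simp [PySem.Chars.join_nil]
      · rw [hconcat]
        simp only [List.concat_eq_append]
        rw [pyGet?_concat_neg_one, PySem.List.slice_to_neg_one, List.dropLast_concat]
        simp only [Option.getD_some]
        -- A side via loop_main with rs = init.reverse
        have hA := loop_main init.reverse last g
        rw [List.reverse_reverse] at hA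
        -- B side
        set n := cntB (g - PySem.Str.len last) init.reverse with hn
        have hk : goodPathReprAltLoop (g - PySem.Str.len last) init.reverse 1
            = 1 + (n : Int) := altLoop_eq init.reverse _ 1
        rw [hk]
        have hnle : n ≤ init.length := by
          have := cntB_le init.reverse (g - PySem.Str.len last)
          simpa using this
        have hneg : (-(1 + (n : Int))) = -(((1 + n : Nat)) : Int) := by push_cast; ring
        rw [hneg, PySem.List.slice_from_neg_natCast _ (1+n) (by omega)]
        have hlen2 : (init ++ [last]).length = init.length + 1 := by simp
        have hdrop : (init ++ [last]).drop ((init ++ [last]).length - (1 + n))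
            = init.drop (init.length - n) ++ [last] := by
          rw [hlen2]
          have : init.length + 1 - (1 + n) = init.length - n := by omega
          rw [this, List.drop_append_of_le_length (by omega)]
        rw [hdrop]
        apply String.toList_inj.mp
        rw [hA, PySem.Str.toList_join]
        rw [drop_reverse_take init n]
        have : ("/" : String).toList = ['/'] := by decide
        rw [this]
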